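-- pv_equiv track=rewrite | github.com/ShiexaMagic/docx-to-srt-converter | src/text_processor.py | _find_optimal_break_point
-- ===== SOURCE A (Python) =====
-- def _find_optimal_break_point(words, max_chars=42):
--     """
--     Find the optimal point to break a list of words into two balanced lines.
--     Prefers breaking at punctuation or natural phrase boundaries.
--     """
--     total_text = " ".join(words)
--     best_idx = 0
--     best_balance = float('inf')
--
--     # First try to find a punctuation break point
--     for i, word in enumerate(words):
--         if i > 0 and i < len(words) - 1:
--             if word.endswith('.') or word.endswith('?') or word.endswith('!') or word.endswith(';') or word.endswith(':'):
--                 first_line = " ".join(words[:i+1])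
--                 second_line = " ".join(words[i+1:])
--                 if len(first_line) <= max_chars and len(second_line) <= max_chars:
--                     return i  # Found a good punctuation break point
--
--     # If no good punctuation break, try to balance the lines
--     current_length = 0
--     for i, word in enumerate(words):
--         if i > 0:
--             current_length += 1  # Space
--         current_length += len(word)
--
--         first_line_length = current_length
--         second_line_length = len(total_text) - current_length
--
--         # We prefer the break point that gives the most balanced lines
--         # but still keeps each line under max_chars
--         if (first_line_length <= max_chars and second_line_length <= max_chars):
--             balance = abs(first_line_length - second_line_length)
--             if balance < best_balance:
--                 best_idx = i
--                 best_balance = balance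
--
--     return best_idx
-- ===== SOURCE B (Python) =====
-- def _find_optimal_break_point(words, max_chars=42):
--     """Single O(n) pass: track line lengths with a running prefix sum, no repeated joins."""
--     n = len(words)
--     total = sum(len(w) for w in words) + (n - 1 if n > 0 else 0)
--     pref = 0
--     best_idx = 0
--     best_balance = None
--     for i, w in enumerate(words):
--         pref += len(w) + (1 if i > 0 else 0)
--         if 0 < i < n - 1 and w.endswith(('.', '?', '!', ';', ':')) \
--                 and pref <= max_chars and total - pref - 1 <= max_chars:
--             return i
--         rest = total - pref
--         if pref <= max_chars and rest <= max_chars: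
--             bal = abs(pref - rest)
--             if best_balance is None or bal < best_balance:
--                 best_idx, best_balance = i, bal
--     return best_idx
-- ===== Notes on version B (the rewrite author's own statement) =====
-- stated objective: faster
-- what changed: B replaces A's two passes with repeated ' '.join slices by a single pass that tracks both line lengths with a running prefix sum (fusing the punctuation check and the balance search into one loop).
import Mathlib
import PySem

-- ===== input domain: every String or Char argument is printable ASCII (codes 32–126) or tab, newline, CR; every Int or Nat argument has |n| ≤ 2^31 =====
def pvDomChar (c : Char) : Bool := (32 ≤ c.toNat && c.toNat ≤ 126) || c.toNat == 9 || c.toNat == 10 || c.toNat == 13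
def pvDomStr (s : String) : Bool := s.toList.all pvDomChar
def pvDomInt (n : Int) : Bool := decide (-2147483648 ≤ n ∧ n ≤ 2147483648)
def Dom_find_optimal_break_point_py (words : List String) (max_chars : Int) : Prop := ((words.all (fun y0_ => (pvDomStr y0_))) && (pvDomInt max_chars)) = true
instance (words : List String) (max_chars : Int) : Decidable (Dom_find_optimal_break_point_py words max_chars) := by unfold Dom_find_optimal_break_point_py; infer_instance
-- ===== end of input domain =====

-- B fuses A's two join-based passes into one prefix-sum pass over the words; equivalence of the return value is proved below.


-- ===== PORT A =====
-- first loop of A: scan for a punctuation break point, early return = Option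
def pyA_pass1 (words : List String) (max_chars : Int) : List String → Int → Option Int
  | [], _ => none
  | word :: rest, i =>
    if i > 0 ∧ i < PySem.List.len words - 1 then
      if PySem.Str.endswith word "." || PySem.Str.endswith word "?" || PySem.Str.endswith word "!" ||
         PySem.Str.endswith word ";" || PySem.Str.endswith word ":" then
        let first_line := PySem.Str.join " " (PySem.List.slice words none (some (i + 1)))
        let second_line := PySem.Str.join " " (PySem.List.slice words (some (i + 1)) none)
        if PySem.Str.len first_line ≤ max_chars ∧ PySem.Str.len second_line ≤ max_chars then
          some i
        else pyA_pass1 words max_chars rest (i + 1)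
      else pyA_pass1 words max_chars rest (i + 1)
    else pyA_pass1 words max_chars rest (i + 1)

-- second loop of A: balance search; best_balance = float('inf') modelled as `none`
def pyA_pass2 (total_len max_chars : Int) : List String → Int → Int → Int → Option Int → Int
  | [], _, _, best_idx, _ => best_idx
  | word :: rest, i, current_length, best_idx, best_balance =>
    let current_length := (if i > 0 then current_length + 1 else current_length) + PySem.Str.len word
    let first_line_length := current_length
    let second_line_length := total_len - current_length
    if first_line_length ≤ max_chars ∧ second_line_length ≤ max_chars then
      let balance := |first_line_length - second_line_length|
      if (match best_balance with | none => true | some b => decide (balance < b)) then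
        pyA_pass2 total_len max_chars rest (i + 1) current_length i (some balance)
      else pyA_pass2 total_len max_chars rest (i + 1) current_length best_idx best_balance
    else pyA_pass2 total_len max_chars rest (i + 1) current_length best_idx best_balance

def find_optimal_break_point_py (words : List String) (max_chars : Int) : Int :=
  let total_text := PySem.Str.join " " words
  match pyA_pass1 words max_chars words 0 with
  | some i => i
  | none => pyA_pass2 (PySem.Str.len total_text) max_chars words 0 0 0 none

-- ===== PORT B =====
-- B's single fused loop: pref is the running first-line length, early return on a punctuation break
def pyB_go (max_chars total n : Int) : List String → Int → Int → Int → Option Int → Int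
  | [], _, _, best_idx, _ => best_idx
  | w :: ws, i, pref, best_idx, best_balance =>
    let pref := pref + PySem.Str.len w + (if i > 0 then 1 else 0)
    if (0 < i ∧ i < n - 1) ∧
       (PySem.Str.endswith w "." || PySem.Str.endswith w "?" || PySem.Str.endswith w "!" ||
        PySem.Str.endswith w ";" || PySem.Str.endswith w ":") = true ∧
       pref ≤ max_chars ∧ total - pref - 1 ≤ max_chars then i
    else
      let rest := total - pref
      if pref ≤ max_chars ∧ rest ≤ max_chars then
        let bal := |pref - rest|
        if (match best_balance with | none => true | some b => decide (bal < b)) then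
          pyB_go max_chars total n ws (i + 1) pref i (some bal)
        else pyB_go max_chars total n ws (i + 1) pref best_idx best_balance
      else pyB_go max_chars total n ws (i + 1) pref best_idx best_balance

def find_optimal_break_point_py_alt (words : List String) (max_chars : Int) : Int :=
  let n := PySem.List.len words
  let total := (words.map (fun w => PySem.Str.len w)).sum + (if n > 0 then n - 1 else 0)
  pyB_go max_chars total n words 0 0 0 none

-- ===== PRECONDITION & SPEC =====
def Spec_find_optimal_break_point_py (words : List String) (max_chars : Int) (out : Int) : Prop := out = find_optimal_break_point_py_alt words max_chars
instance (words : List String) (max_chars : Int) (out : Int) : Decidable (Spec_find_optimal_break_point_py words max_chars out) := by unfold Spec_find_optimal_break_point_py; infer_instance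

-- ===== CLAIM (what is proved, stated in full; the proofs are below) =====
def Claim_equal_find_optimal_break_point_py : Prop := ∀ (words : List String) (max_chars : Int), Dom_find_optimal_break_point_py words max_chars → Spec_find_optimal_break_point_py words max_chars (find_optimal_break_point_py words max_chars)

-- ===== LEMMAS AND PROOFS =====

def pvS (ws : List String) : Int := (ws.map (fun w => PySem.Str.len w)).sum
def pvT (words : List String) : Int := pvS words + (if (PySem.List.len words) > 0 then (PySem.List.len words) - 1 else 0)
def pvP (words : List String) (k : Nat) : Int := if k = 0 then 0 else pvS (words.take k) + k - 1
theorem pv_join_len (parts : List String) (h : parts ≠ []) :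
    PySem.Str.len (PySem.Str.join " " parts) = pvS parts + parts.length - 1 := by
  induction parts with
  | nil => simp at h
  | cons p rest ih =>
    cases rest with
    | nil =>
      simp [pvS, PySem.Str.len_eq, PySem.Str.toList_join, PySem.Chars.join_singleton]
    | cons q rest' =>
      have hne : q :: rest' ≠ [] := by simp
      have := ih hne
      simp only [PySem.Str.len_eq, PySem.Str.toList_join, List.map_cons] at this ⊢
      rw [PySem.Chars.join_cons_cons]
      simp only [List.length_append, List.length_cons] at this ⊢
      simp only [pvS, List.map_cons, List.sum_cons] at this ⊢
      push_cast at this ⊢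
      simp [PySem.Str.len_eq] at this ⊢
      omega


theorem pv_T_eq_join (words : List String) :
    PySem.Str.len (PySem.Str.join " " words) = pvT words := by
  cases words with
  | nil => simp [pvT, pvS, PySem.Str.len_eq, PySem.Str.toList_join, PySem.Chars.join_nil, PySem.List.len_eq]
  | cons w ws =>
    rw [pv_join_len _ (by simp), pvT]
    simp [PySem.List.len_eq]
    omega

theorem pv_S_take_succ (words : List String) (k : Nat) (hk : k < words.length) :
    pvS (words.take (k + 1)) = pvS (words.take k) + PySem.Str.len words[k] := by
  simp only [pvS, List.map_take]
  rw [List.sum_take_succ _ k (by simpa using hk)]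
  simp

theorem pv_P_succ (words : List String) (k : Nat) (hk : k < words.length) :
    pvP words k + PySem.Str.len words[k] + (if (k : Int) > 0 then 1 else 0) = pvP words (k + 1) := by
  rcases Nat.eq_zero_or_pos k with h0 | h0
  · subst h0
    rw [pvP, pvP, if_pos rfl, if_neg (by omega), pv_S_take_succ words 0 hk]
    simp [pvS]
  · rw [pvP, pvP, if_neg (show ¬ k = 0 by omega), if_neg (show ¬ k + 1 = 0 by omega),
        if_pos (show (k : Int) > 0 by exact_mod_cast h0), pv_S_take_succ words k hk]
    push_cast
    ring

theorem pv_S_split (words : List String) (k : Nat) :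
    pvS words = pvS (words.take k) + pvS (words.drop k) := by
  conv_lhs => rw [← List.take_append_drop k words]
  simp [pvS]

theorem pv_first_line (words : List String) (k : Nat) (hk : k < words.length) :
    PySem.Str.len (PySem.Str.join " " (PySem.List.slice words none (some ((k : Int) + 1)))) =
      pvP words (k + 1) := by
  rw [PySem.List.slice_to words (by omega)]
  have h1 : ((k : Int) + 1).toNat = k + 1 := by omega
  have hw : words ≠ [] := by intro h; subst h; simp at hk
  rw [h1, pv_join_len _ (by simp [List.take_eq_nil_iff, hw])]
  rw [pvP, if_neg (by omega)]
  have : (words.take (k+1)).length = k + 1 := by simp; omega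
  rw [this]

theorem pv_second_line (words : List String) (k : Nat) (hk : k + 1 < words.length) :
    PySem.Str.len (PySem.Str.join " " (PySem.List.slice words (some ((k : Int) + 1)) none)) =
      pvT words - pvP words (k + 1) - 1 := by
  rw [PySem.List.slice_from words (by omega)]
  have h1 : ((k : Int) + 1).toNat = k + 1 := by omega
  rw [h1]
  have hd : words.drop (k+1) ≠ [] := by
    rw [ne_eq, List.drop_eq_nil_iff]; omega
  rw [pv_join_len _ hd]
  rw [pvT, pvP, if_neg (show ¬ k + 1 = 0 by omega),
      if_pos (show PySem.List.len words > 0 by rw [PySem.List.len_eq]; omega)]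
  have hs := pv_S_split words (k+1)
  have hlen : (words.drop (k+1)).length = words.length - (k+1) := by simp
  rw [hlen, PySem.List.len_eq]
  omega


theorem pv_main (words : List String) (max_chars : Int) :
    ∀ (m k : Nat), words.length - k = m → k ≤ words.length →
      ∀ (bid : Int) (bbal : Option Int),
        pyB_go max_chars (pvT words) (PySem.List.len words) (words.drop k) (k : Int) (pvP words k) bid bbal =
          match pyA_pass1 words max_chars (words.drop k) (k : Int) with
          | some i => i
          | none => pyA_pass2 (pvT words) max_chars (words.drop k) (k : Int) (pvP words k) bid bbal := by
  intro m
  induction m with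
  | zero =>
    intro k hm hk bid bbal
    have hke : k = words.length := by omega
    subst hke
    simp [List.drop_length, pyB_go, pyA_pass1, pyA_pass2]
  | succ m ih =>
    intro k hm hk bid bbal
    have hklt : k < words.length := by omega
    have hdrop : words.drop k = words[k] :: words.drop (k + 1) := List.drop_eq_getElem_cons hklt
    rw [hdrop]
    have hP := pv_P_succ words k hklt
    have hP' : (if (k : Int) > 0 then pvP words k + 1 else pvP words k) + PySem.Str.len words[k]
        = pvP words (k + 1) := by
      split_ifs with h
      · rw [← hP, if_pos h]; ring
      · rw [← hP, if_neg h]; ring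
    have hlen := PySem.List.len_eq words
    have ihk : ∀ (bid : Int) (bbal : Option Int),
        pyB_go max_chars (pvT words) (PySem.List.len words) (words.drop (k+1)) ((k : Int) + 1) (pvP words (k+1)) bid bbal =
          match pyA_pass1 words max_chars (words.drop (k+1)) ((k : Int) + 1) with
          | some i => i
          | none => pyA_pass2 (pvT words) max_chars (words.drop (k+1)) ((k : Int) + 1) (pvP words (k+1)) bid bbal := by
      intro bid bbal
      have h := ih (k+1) (by omega) (by omega) bid bbal
      push_cast at h
      exact h
    simp only [pyB_go, pyA_pass1, pyA_pass2]
    rw [hP, hP']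
    by_cases hc1 : (0 : Int) < (k : Int) ∧ (k : Int) < PySem.List.len words - 1
    · have hk1 : k + 1 < words.length := by
        have := hc1.2; rw [hlen] at this; omega
      rw [pv_first_line words k hklt, pv_second_line words k hk1]
      rw [if_pos hc1]
      split_ifs <;> first | rfl | (exact ihk _ _) | tauto
    · rw [if_neg hc1, if_neg (show ¬ ((0 < (k:Int) ∧ (k:Int) < PySem.List.len words - 1) ∧ _) from fun h => hc1 h.1)]
      split_ifs <;> first | rfl | (exact ihk _ _)

-- ===== VERDICT (by name: the statement is the Claim_ definition above) =====
theorem find_optimal_break_point_py_spec : Claim_equal_find_optimal_break_point_py := by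
  intro words max_chars _
  unfold Spec_find_optimal_break_point_py
  have h := pv_main words max_chars words.length 0 (by omega) (by omega) 0 none
  simp only [List.drop_zero, Nat.cast_zero, pvP] at h
  simp only [find_optimal_break_point_py, find_optimal_break_point_py_alt]
  rw [pv_T_eq_join]
  have ht : (words.map (fun w => PySem.Str.len w)).sum +
      (if PySem.List.len words > 0 then PySem.List.len words - 1 else 0) = pvT words := rfl
  rw [ht]
  exact h.symm
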